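-- pv_equiv track=rewrite | github.com/jacopo-minniti/process-uncertainty-models | rely/evaluate/goodhart.py | evaluated_step_indices
-- ===== SOURCE A (Python) =====
-- def evaluated_step_indices(num_steps: int, evaluate_n_steps: int) -> list[int]:
--     """
--     Mirror SBS logic: return the step indices where a separator is inserted.
--     When evaluate_n_steps > 1, only every n-th (and the final) step gets <extra_0>.
--     """
--     eval_every = max(1, int(evaluate_n_steps))
--     indices: list[int] = []
--     steps_since_sep = 0
--     for idx in range(1, num_steps + 1):
--         steps_since_sep += 1
--         is_last = idx == num_steps
--         if steps_since_sep == eval_every or is_last: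
--             indices.append(idx)
--             steps_since_sep = 0
--     return indices
-- ===== SOURCE B (Python) =====
-- def evaluated_step_indices(num_steps: int, evaluate_n_steps: int) -> list[int]:
--     """Separator step indices: every eval_every-th step, plus the final step."""
--     eval_every = max(1, int(evaluate_n_steps))
--     indices = list(range(eval_every, num_steps + 1, eval_every))
--     if num_steps >= 1 and num_steps % eval_every != 0:
--         indices.append(num_steps)
--     return indices
-- ===== Notes on version B (the rewrite author's own statement) =====
-- stated objective: faster
-- what changed: Replaced the O(num_steps) step-by-step counter loop with a direct arithmetic range of the multiples of eval_every up to num_steps, appending num_steps when it is not itself a multiple.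
import Mathlib
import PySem

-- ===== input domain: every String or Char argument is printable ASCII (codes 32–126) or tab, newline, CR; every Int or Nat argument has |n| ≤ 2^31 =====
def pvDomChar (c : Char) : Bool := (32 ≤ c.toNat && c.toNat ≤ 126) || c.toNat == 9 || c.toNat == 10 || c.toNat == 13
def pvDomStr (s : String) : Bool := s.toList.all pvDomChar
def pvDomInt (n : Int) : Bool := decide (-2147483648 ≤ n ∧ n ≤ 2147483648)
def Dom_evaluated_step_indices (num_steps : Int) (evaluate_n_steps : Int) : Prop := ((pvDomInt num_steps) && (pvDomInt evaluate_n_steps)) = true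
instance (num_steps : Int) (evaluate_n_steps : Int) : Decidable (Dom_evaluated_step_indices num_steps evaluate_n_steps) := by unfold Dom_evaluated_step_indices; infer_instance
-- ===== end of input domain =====

-- B replaces A's per-step counter loop by a direct arithmetic range of multiples (faster).

-- ===== PORT A =====
-- loop body of A's for-loop: state = (indices, steps_since_sep)
def pvLoopBody (num_steps : Int) (eval_every : Int) (st : List Int × Int) (idx : Int) : List Int × Int :=
  let steps_since_sep := st.2 + 1
  if steps_since_sep = eval_every ∨ idx = num_steps then (st.1 ++ [idx], 0) else (st.1, steps_since_sep)

def evaluated_step_indices (num_steps : Int) (evaluate_n_steps : Int) : List Int :=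
  let eval_every := max 1 evaluate_n_steps
  ((PySem.List.pyRange 1 (num_steps + 1) 1).foldl (pvLoopBody num_steps eval_every) ([], 0)).1

-- ===== PORT B =====
def evaluated_step_indices_alt (num_steps : Int) (evaluate_n_steps : Int) : List Int :=
  let eval_every := max 1 evaluate_n_steps
  let indices := PySem.List.pyRange eval_every (num_steps + 1) eval_every
  if 1 ≤ num_steps ∧ PySem.Int.mod num_steps eval_every ≠ 0 then indices ++ [num_steps] else indices

-- ===== PRECONDITION & SPEC =====
def Spec_evaluated_step_indices (num_steps : Int) (evaluate_n_steps : Int) (out : List Int) : Prop := out = evaluated_step_indices_alt num_steps evaluate_n_steps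
instance (num_steps : Int) (evaluate_n_steps : Int) (out : List Int) : Decidable (Spec_evaluated_step_indices num_steps evaluate_n_steps out) := by unfold Spec_evaluated_step_indices; infer_instance

-- ===== CLAIM (what is proved, stated in full; the proofs are below) =====
def Claim_equal_evaluated_step_indices : Prop := ∀ (num_steps : Int) (evaluate_n_steps : Int), Dom_evaluated_step_indices num_steps evaluate_n_steps → Spec_evaluated_step_indices num_steps evaluate_n_steps (evaluated_step_indices num_steps evaluate_n_steps)

-- ===== LEMMAS AND PROOFS =====

-- arithmetic: stepping the counter past a full period
lemma pvStepFull {k e : Int} (he : 0 < e) (h : k % e = e - 1) :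
    (k + 1) / e = k / e + 1 ∧ (k + 1) % e = 0 ∧ e * (k / e + 1) = k + 1 := by
  have hdm : e * (k / e) + k % e = k := Int.mul_ediv_add_emod k e
  have h1 : e * (k / e + 1) = k + 1 := by
    have : e * (k / e + 1) = e * (k / e) + e := by ring
    omega
  refine ⟨?_, ?_, h1⟩
  · rw [← h1]; exact Int.mul_ediv_cancel_left _ (ne_of_gt he)
  · rw [← h1]; exact Int.mul_emod_right _ _

-- arithmetic: stepping the counter inside a period
lemma pvStepMid {k e : Int} (he : 0 < e) (h : k % e ≠ e - 1) :
    (k + 1) / e = k / e ∧ (k + 1) % e = k % e + 1 := by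
  have hlt : k % e < e := Int.emod_lt_of_pos k he
  have hge : 0 ≤ k % e := Int.emod_nonneg k (ne_of_gt he)
  have hdm : e * (k / e) + k % e = k := Int.mul_ediv_add_emod k e
  have := (Int.ediv_emod_unique (a := k + 1) (b := e) (r := k % e + 1) (q := k / e) he).mpr
    ⟨by omega, by omega, by omega⟩
  exact ⟨this.1, this.2⟩

-- B's range is the list of positive multiples of e up to n
lemma pvRangeMultiples {e n : Int} (he : 0 < e) (hn : 0 ≤ n) :
    PySem.List.pyRange e (n + 1) e
      = (List.range (n / e).toNat).map (fun (j : Nat) => e * ((j : Int) + 1)) := by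
  rw [PySem.List.pyRange_of_pos e (n + 1) he]
  have hcnt : (if e < n + 1 then ((n + 1 - e + e - 1) / e).toNat else 0) = (n / e).toNat := by
    split_ifs with hlt
    · congr 2; ring
    · have : n / e = 0 := Int.ediv_eq_zero_of_lt hn (by omega)
      omega
  rw [hcnt]
  exact List.map_congr_left (fun j _ => by ring)

-- loop invariant: after the first k steps (all with idx < num_steps), indices holds
-- the multiples of e among 1..k and the counter equals k % e
lemma pvLoopInv (n e : Int) (he : 0 < e) :
    ∀ k : Nat, (k : Int) < n →
      (PySem.List.pyRange 1 ((k : Int) + 1) 1).foldl (pvLoopBody n e) ([], 0)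
        = ((List.range ((k : Int) / e).toNat).map (fun (j : Nat) => e * ((j : Int) + 1)), (k : Int) % e) := by
  intro k
  induction k with
  | zero =>
    intro _
    rw [PySem.List.pyRange_one_eq_nil (by norm_num)]
    simp
  | succ k ih =>
    intro hlt
    push_cast at hlt ⊢
    rw [PySem.List.pyRange_one_succ_right (by omega), List.foldl_append,
      ih (by omega), List.foldl_cons, List.foldl_nil]
    have hq0 : 0 ≤ (k : Int) / e := Int.ediv_nonneg (by positivity) (le_of_lt he)
    by_cases hfull : (k : Int) % e = e - 1
    · obtain ⟨hd, hm, hmul⟩ := pvStepFull he hfull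
      rw [pvLoopBody, if_pos (Or.inl (by omega))]
      rw [Prod.mk.injEq]
      constructor
      · rw [hd, show ((k : Int) / e + 1).toNat = ((k : Int) / e).toNat + 1 by omega,
          List.range_succ, List.map_append, List.map_cons, List.map_nil]
        congr 2
        rw [Int.toNat_of_nonneg hq0]
        exact hmul.symm
      · omega
    · obtain ⟨hd, hm⟩ := pvStepMid he hfull
      have hge : 0 ≤ (k : Int) % e := Int.emod_nonneg _ (ne_of_gt he)
      rw [pvLoopBody, if_neg (by omega)]
      rw [hd, hm]

-- ===== VERDICT (by name: the statement is the Claim_ definition above) =====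
theorem evaluated_step_indices_spec : Claim_equal_evaluated_step_indices := by
  intro n ens _
  unfold Spec_evaluated_step_indices evaluated_step_indices evaluated_step_indices_alt
  simp only []
  set e := max 1 ens with hedef
  have he : 0 < e := lt_of_lt_of_le Int.zero_lt_one (le_max_left 1 ens)
  rw [PySem.Int.mod_eq_emod_of_pos he]
  by_cases hn : 1 ≤ n
  · -- at least one step: the loop runs over 1..n, the last step always appends n
    set k : Nat := (n - 1).toNat with hkdef
    have hk : (k : Int) = n - 1 := Int.toNat_of_nonneg (by omega)
    have hinv := pvLoopInv n e he k (by omega)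
    rw [show ((k : Int) + 1) = n by omega] at hinv
    rw [pvRangeMultiples he (by omega),
      PySem.List.pyRange_one_succ_right (by omega), List.foldl_append, hinv,
      List.foldl_cons, List.foldl_nil, pvLoopBody, if_pos (Or.inr rfl)]
    have hq0 : 0 ≤ (n - 1) / e := Int.ediv_nonneg (by omega) (le_of_lt he)
    by_cases hdvd : n % e = 0
    · -- final step is itself a multiple of e: B's range already ends with n
      rw [if_neg (by simp [hdvd])]
      have hfull : (n - 1) % e = e - 1 := by
        by_contra hne
        have h2 := (pvStepMid he hne).2
        have hnn : 0 ≤ (n - 1) % e := Int.emod_nonneg _ (ne_of_gt he)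
        rw [show n - 1 + 1 = n by ring] at h2
        omega
      obtain ⟨hd, _, hmul⟩ := pvStepFull he hfull
      rw [show n - 1 + 1 = n by ring] at hd hmul
      rw [hk, hd, show ((n - 1) / e + 1).toNat = ((n - 1) / e).toNat + 1 by omega,
        List.range_succ, List.map_append, List.map_cons, List.map_nil]
      dsimp only
      congr 2
      rw [Int.toNat_of_nonneg hq0]
      exact hmul.symm
    · -- final step is not a multiple: B appends it explicitly
      rw [if_pos ⟨hn, hdvd⟩]
      have hne : (n - 1) % e ≠ e - 1 := by
        intro hfull
        have := (pvStepFull he hfull).2.1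
        rw [show n - 1 + 1 = n by ring] at this
        exact hdvd this
      have hd := (pvStepMid he hne).1
      rw [show n - 1 + 1 = n by ring] at hd
      rw [hk, hd]
  · -- no steps: both sides are the empty list
    rw [PySem.List.pyRange_one_eq_nil (by omega), List.foldl_nil,
      if_neg (by intro h; omega)]
    rw [PySem.List.pyRange_of_pos e (n + 1) he, if_neg (by omega : ¬ e < n + 1)]
    simp
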